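-- pv_equiv track=rewrite | github.com/Grzegorz-Jankowski/Cipher | encryption.py | decrypting_rot47
-- ===== SOURCE A (Python) =====
-- def decrypting_rot47(message):
--     key = 47
--     decrypted = ""
--
--     for character in message:
--
--         if character.isupper():
--             character_idx = ord(character) - ord("A")
--             character_original_position = (character_idx - key) % 26 + ord("A")
--             decrypted += chr(character_original_position)
--
--         elif character.islower():
--             character_idx = ord(character) - ord("a")
--             character_original_position = (character_idx - key) % 26 + ord("a")
--             decrypted += chr(character_original_position)
--
--         elif character.isdigit():
--             character_original_position = (int(character) - key) % 10
--             decrypted += str(character_original_position)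
--
--         else:
--             decrypted += character
--
--     return decrypted
-- ===== SOURCE B (Python) =====
-- def decrypting_rot47(message):
--     table = {}
--     for i in range(26):
--         table[ord('A') + i] = chr((i - 47) % 26 + ord('A'))
--         table[ord('a') + i] = chr((i - 47) % 26 + ord('a'))
--     for d in range(10):
--         table[ord('0') + d] = str((d - 47) % 10)
--     return message.translate(table)
-- ===== Notes on version B (the rewrite author's own statement) =====
-- stated objective: idiomatic
-- what changed: B precomputes a 62-entry translation table once (dict of ord->char) and applies str.translate in one pass, replacing A's four-way per-character branch loop with string concatenation.
import Mathlib
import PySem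

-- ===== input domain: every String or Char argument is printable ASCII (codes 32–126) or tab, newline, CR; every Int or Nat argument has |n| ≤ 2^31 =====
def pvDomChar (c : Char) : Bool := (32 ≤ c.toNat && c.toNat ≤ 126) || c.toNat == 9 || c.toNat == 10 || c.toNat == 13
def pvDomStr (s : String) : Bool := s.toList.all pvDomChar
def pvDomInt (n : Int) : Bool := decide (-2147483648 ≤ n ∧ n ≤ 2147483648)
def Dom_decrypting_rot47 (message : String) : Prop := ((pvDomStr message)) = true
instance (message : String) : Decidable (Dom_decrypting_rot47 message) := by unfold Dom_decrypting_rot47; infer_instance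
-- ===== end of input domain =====

-- B replaces A's per-character branch loop by a precomputed translation table and one lookup pass (idiomatic; return value only).

-- ===== PORT A =====
-- One iteration of A's loop body: the four-way branch producing the characters appended
-- to `decrypted`. The isupper/islower/isdigit tests are written as the ASCII range checks,
-- exact on the printable-ASCII domain Dom_decrypting_rot47.
def decA_step (character : Char) : List Char :=
  if 65 ≤ character.toNat ∧ character.toNat ≤ 90 then
    [Char.ofNat ((PySem.Int.mod ((character.toNat : Int) - 65 - 47) 26 + 65).toNat)]
  else if 97 ≤ character.toNat ∧ character.toNat ≤ 122 then
    [Char.ofNat ((PySem.Int.mod ((character.toNat : Int) - 97 - 47) 26 + 97).toNat)]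
  else if 48 ≤ character.toNat ∧ character.toNat ≤ 57 then
    PySem.Int.toChars (PySem.Int.mod (((character.toNat : Int) - 48) - 47) 10)
  else [character]

def decrypting_rot47 (message : String) : String :=
  String.mk (message.toList.foldl (fun decrypted character => decrypted ++ decA_step character) [])

-- ===== PORT B =====
-- Source B's translation table: ord(char) ↦ replacement string, built by the two range loops.
def rotTable : PySem.Dict Nat (List Char) :=
  let t := (List.range 26).foldl
    (fun (t : PySem.Dict Nat (List Char)) i =>
      (t.insert (65 + i) [Char.ofNat ((PySem.Int.mod ((i : Int) - 47) 26 + 65).toNat)]).insert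
        (97 + i) [Char.ofNat ((PySem.Int.mod ((i : Int) - 47) 26 + 97).toNat)])
    PySem.Dict.empty
  (List.range 10).foldl
    (fun (t : PySem.Dict Nat (List Char)) d =>
      t.insert (48 + d) (PySem.Int.toChars (PySem.Int.mod ((d : Int) - 47) 10))) t

-- str.translate: each character is replaced by its table entry, or kept if absent.
def decrypting_rot47_alt (message : String) : String :=
  String.mk (message.toList.flatMap (fun c => rotTable.getD c.toNat [c]))

-- ===== PRECONDITION & SPEC =====
def Spec_decrypting_rot47 (message : String) (out : String) : Prop := out = decrypting_rot47_alt message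
instance (message : String) (out : String) : Decidable (Spec_decrypting_rot47 message out) := by unfold Spec_decrypting_rot47; infer_instance

-- ===== CLAIM (what is proved, stated in full; the proofs are below) =====
def Claim_equal_decrypting_rot47 : Prop := ∀ (message : String), Dom_decrypting_rot47 message → Spec_decrypting_rot47 message (decrypting_rot47 message)

-- ===== LEMMAS AND PROOFS =====

-- On every domain character A's branch and B's table lookup agree (62 mapped chars + identity).
set_option maxRecDepth 4096 in
theorem step_eq_lookup_ofNat : ∀ n ∈ List.range 127,
    decA_step (Char.ofNat n) = rotTable.getD (Char.ofNat n).toNat [Char.ofNat n] := by decide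

theorem step_eq_lookup (c : Char) (h : pvDomChar c = true) :
    decA_step c = rotTable.getD c.toNat [c] := by
  have hc : c.toNat < 127 := by
    simp [pvDomChar] at h; omega
  have := step_eq_lookup_ofNat c.toNat (List.mem_range.mpr hc)
  simpa [Char.ofNat_toNat] using this

theorem flat_eq (l : List Char) (h : l.all pvDomChar = true) :
    l.foldl (fun decrypted character => decrypted ++ decA_step character) [] =
      l.flatMap (fun c => rotTable.getD c.toNat [c]) := by
  rw [PySem.List.foldl_append_eq_flatMap]
  induction l with
  | nil => rfl
  | cons a l ih =>
    simp only [List.all_cons, Bool.and_eq_true] at h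
    simp only [List.nil_append] at ih
    simp [List.flatMap_cons, step_eq_lookup a h.1, ih h.2]

-- ===== VERDICT (by name: the statement is the Claim_ definition above) =====
theorem decrypting_rot47_spec : Claim_equal_decrypting_rot47 := by
  intro message hdom
  unfold Spec_decrypting_rot47 decrypting_rot47 decrypting_rot47_alt
  rw [flat_eq message.toList hdom]
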